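-- pv_equiv track=rewrite | github.com/KimSeongGyun/practice | practice2_1.py | a_precede_b
-- ===== SOURCE A (Python) =====
-- dataform=[str,int,int] #dataform of the file
--
-- def a_precede_b (a,b): #telling the ordering
-- 	for i in range(len(dataform)):
-- 		if dataform[i]==int:
-- 			if int(b[i])<int(a[i]):
-- 				return False
-- 			elif int(b[i])>int(a[i]):
-- 				return True
-- 			else:
-- 				continue
-- 		for j in range(min(len(a[i]),len(b[i]))):
-- 			if a[i][j]>b[i][j]:
-- 				return False
-- 			elif a[i][j]<b[i][j]:
-- 				return True
-- 		if len(a[i])>len(b[i]):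
-- 			return False
-- 		elif len(b[i])>len(a[i]):
-- 			return True
-- 	return True
-- ===== SOURCE B (Python) =====
-- dataform = [str, int, int]
--
-- def a_precede_b(a, b):
--     for i, t in enumerate(dataform):
--         if t is int:
--             va, vb = int(a[i]), int(b[i])
--             if va != vb:
--                 return va < vb
--         else:
--             if a[i] != b[i]:
--                 return a[i] < b[i]
--     return True
-- ===== Notes on version B (the rewrite author's own statement) =====
-- stated objective: simpler
-- what changed: B replaces A's hand-rolled character-by-character loop plus trailing length comparison with Python's native string ordering, and collapses each field's three-way branch into a single 'if different, return x < y'.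
import Mathlib
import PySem

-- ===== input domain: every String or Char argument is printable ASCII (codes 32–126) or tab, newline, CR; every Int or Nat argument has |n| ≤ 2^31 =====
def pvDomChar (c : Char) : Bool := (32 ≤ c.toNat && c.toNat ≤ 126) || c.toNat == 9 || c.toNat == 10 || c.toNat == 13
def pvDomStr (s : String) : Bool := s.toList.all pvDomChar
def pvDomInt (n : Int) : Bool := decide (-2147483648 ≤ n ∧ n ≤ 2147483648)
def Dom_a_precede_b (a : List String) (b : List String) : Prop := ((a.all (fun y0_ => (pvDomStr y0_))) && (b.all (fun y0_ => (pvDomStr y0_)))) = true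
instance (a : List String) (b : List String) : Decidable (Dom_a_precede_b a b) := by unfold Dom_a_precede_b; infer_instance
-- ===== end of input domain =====

-- B replaces A's hand-rolled per-character loop (plus trailing length comparison) by a single
-- native string comparison per field, keeping the same early-return field order (objective: simpler).

-- ===== PORT A =====
inductive PvDF | dstr | dint
deriving DecidableEq, Repr

-- module constant dataform = [str, int, int]
def pvDataform : List PvDF := [PvDF.dstr, PvDF.dint, PvDF.dint]

-- A's inner loop: for j in range(min(len(a[i]), len(b[i]))): …  (some = early return, none = fell through)
def pvCharLoop : List Char → List Char → Option Bool
  | x :: xs, y :: ys =>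
    if y < x then some false
    else if x < y then some true
    else pvCharLoop xs ys
  | _, _ => none

-- A's outer loop over range(len(dataform)); IndexError / ValueError are excluded by Pre_ (false there)
def pvALoop (a b : List String) : List PvDF → Int → Bool
  | [], _ => true
  | PvDF.dint :: rest, i =>
    match PySem.List.pyGet? b i, PySem.List.pyGet? a i with
    | some sb, some sa =>
      match PySem.Int.ofStr? sb, PySem.Int.ofStr? sa with
      | some vb, some va =>
        if vb < va then false
        else if va < vb then true
        else pvALoop a b rest (i + 1)
      | _, _ => false
    | _, _ => false
  | PvDF.dstr :: rest, i =>
    match PySem.List.pyGet? a i, PySem.List.pyGet? b i with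
    | some sa, some sb =>
      match pvCharLoop sa.toList sb.toList with
      | some r => r
      | none =>
        if sb.toList.length < sa.toList.length then false
        else if sa.toList.length < sb.toList.length then true
        else pvALoop a b rest (i + 1)
    | _, _ => false

def a_precede_b (a : List String) (b : List String) : Bool := pvALoop a b pvDataform 0

-- ===== PORT B =====
-- B's loop: for i, t in enumerate(dataform), one native comparison per field
def pvBLoop (a b : List String) : List (Int × PvDF) → Bool
  | [] => true
  | (i, PvDF.dint) :: rest =>
    match PySem.List.pyGet? a i, PySem.List.pyGet? b i with
    | some sa, some sb =>
      match PySem.Int.ofStr? sa, PySem.Int.ofStr? sb with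
      | some va, some vb => if va ≠ vb then decide (va < vb) else pvBLoop a b rest
      | _, _ => false
    | _, _ => false
  | (i, PvDF.dstr) :: rest =>
    match PySem.List.pyGet? a i, PySem.List.pyGet? b i with
    | some sa, some sb => if sa ≠ sb then decide (sa < sb) else pvBLoop a b rest
    | _, _ => false

def a_precede_b_alt (a : List String) (b : List String) : Bool :=
  pvBLoop a b (PySem.List.enumerate pvDataform 0)

-- ===== PRECONDITION & SPEC =====
-- Pre_ excludes exactly the inputs where A raises: IndexError when a field that is actually
-- reached is missing, ValueError when a reached int field fails int() parsing.
def Pre_a_precede_b (a : List String) (b : List String) : Prop :=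
  1 ≤ a.length ∧ 1 ≤ b.length ∧
  (a.getD 0 "" = b.getD 0 "" →
    2 ≤ a.length ∧ 2 ≤ b.length ∧
    (PySem.Int.ofStr? (a.getD 1 "")).isSome = true ∧ (PySem.Int.ofStr? (b.getD 1 "")).isSome = true ∧
    (PySem.Int.ofStr? (a.getD 1 "") = PySem.Int.ofStr? (b.getD 1 "") →
      3 ≤ a.length ∧ 3 ≤ b.length ∧
      (PySem.Int.ofStr? (a.getD 2 "")).isSome = true ∧ (PySem.Int.ofStr? (b.getD 2 "")).isSome = true))
instance (a : List String) (b : List String) : Decidable (Pre_a_precede_b a b) := by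
  unfold Pre_a_precede_b; infer_instance

def pvWitness_a_precede_b : List String × List String := (["x", "1", "2"], ["x", "1", "3"])

def Spec_a_precede_b (a : List String) (b : List String) (out : Bool) : Prop := out = a_precede_b_alt a b
instance (a : List String) (b : List String) (out : Bool) : Decidable (Spec_a_precede_b a b out) := by unfold Spec_a_precede_b; infer_instance

-- ===== CLAIM (what is proved, stated in full; the proofs are below) =====
def Claim_equal_a_precede_b : Prop := ∀ (a : List String) (b : List String), Dom_a_precede_b a b → Pre_a_precede_b a b → Spec_a_precede_b a b (a_precede_b a b)

-- ===== LEMMAS AND PROOFS =====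

-- A's string-field code (char loop + length comparison) equals one lexicographic comparison
lemma pvCharCase (xs ys : List Char) (k : Bool) :
    (match pvCharLoop xs ys with
     | some r => r
     | none =>
       if ys.length < xs.length then false
       else if xs.length < ys.length then true
       else k)
    = (if xs ≠ ys then decide (xs < ys) else k) := by
  induction xs generalizing ys with
  | nil =>
    cases ys with
    | nil => simp [pvCharLoop]
    | cons y yt => simp [pvCharLoop, List.nil_lt_cons]
  | cons x xt ih =>
    cases ys with
    | nil => simp [pvCharLoop, List.not_lt_nil]
    | cons y yt =>
      by_cases hyx : y < x
      · have hne : x :: xt ≠ y :: yt := by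
          intro h; cases h; exact lt_irrefl _ hyx
        have hnlt : ¬ (x :: xt < y :: yt) := by
          rw [List.cons_lt_cons_iff]
          rintro (h | ⟨h, -⟩)
          · exact absurd hyx (lt_asymm h)
          · exact absurd hyx (by rw [h]; exact lt_irrefl _)
        simp [pvCharLoop, hyx, hne, hnlt]
      · by_cases hxy : x < y
        · have hne : x :: xt ≠ y :: yt := by
            intro h; cases h; exact lt_irrefl _ hxy
          have hlt : x :: xt < y :: yt := List.cons_lt_cons_iff.mpr (Or.inl hxy)
          simp [pvCharLoop, hyx, hxy, hne, hlt]
        · have hx : x = y := le_antisymm (not_lt.mp hyx) (not_lt.mp hxy)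
          subst hx
          have h2 : (x :: xt < x :: yt) ↔ (xt < yt) := by
            rw [List.cons_lt_cons_iff]
            constructor
            · rintro (h | ⟨-, h⟩)
              · exact absurd h (lt_irrefl _)
              · exact h
            · intro h; exact Or.inr ⟨rfl, h⟩
          simp only [pvCharLoop, if_neg (lt_irrefl x), List.length_cons,
            Nat.add_lt_add_iff_right]
          rw [ih yt]
          simp [h2]

lemma pvStrCase (sa sb : String) (k : Bool) :
    (match pvCharLoop sa.toList sb.toList with
     | some r => r
     | none =>
       if sb.toList.length < sa.toList.length then false
       else if sa.toList.length < sb.toList.length then true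
       else k)
    = (if sa ≠ sb then decide (sa < sb) else k) := by
  rw [pvCharCase]
  by_cases h : sa = sb
  · subst h; simp
  · have h' : sa.toList ≠ sb.toList := fun hc => h (String.toList_inj.mp hc)
    simp only [ne_eq, h, h', not_false_eq_true, if_true]
    simp [String.lt_iff_toList_lt]

lemma pvIntCase (va vb : Int) (k : Bool) :
    (if vb < va then false else if va < vb then true else k)
    = (if va ≠ vb then decide (va < vb) else k) := by
  by_cases h : va = vb
  · subst h; simp
  · rcases lt_or_gt_of_ne h with hlt | hgt
    · simp [hlt, not_lt.mpr hlt.le, h]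
    · simp [hgt, not_lt.mpr hgt.le, h]

-- ===== VERDICT (by name: the statement is the Claim_ definition above) =====
theorem a_precede_b_spec : Claim_equal_a_precede_b := by
  intro a b _hdom hpre
  obtain ⟨ha1, hb1, hrest⟩ := hpre
  unfold Spec_a_precede_b
  match a, b with
  | a0 :: as, b0 :: bs =>
    simp only [List.getD_cons_zero] at hrest
    by_cases h0 : a0 = b0
    · obtain ⟨ha2, hb2, hpa1, hpb1, hrest2⟩ := hrest h0
      match as, bs with
      | a1 :: as', b1 :: bs' =>
        simp only [List.getD_cons_succ, List.getD_cons_zero] at hpa1 hpb1 hrest2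
        obtain ⟨va, hva⟩ := Option.isSome_iff_exists.mp hpa1
        obtain ⟨vb, hvb⟩ := Option.isSome_iff_exists.mp hpb1
        by_cases h1 : va = vb
        · obtain ⟨ha3, hb3, hpa2, hpb2⟩ := hrest2 (by rw [hva, hvb, h1])
          match as', bs' with
          | a2 :: as'', b2 :: bs'' =>
            simp only [List.getD_cons_zero] at hpa2 hpb2
            obtain ⟨wa, hwa⟩ := Option.isSome_iff_exists.mp hpa2
            obtain ⟨wb, hwb⟩ := Option.isSome_iff_exists.mp hpb2
            simp only [a_precede_b, a_precede_b_alt, pvALoop, pvBLoop, pvDataform,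
              PySem.List.enumerate_cons, PySem.List.enumerate_nil, PySem.List.pyGet?_zero_cons,
              show ((0:Int)+1) = 1 from rfl, show ((1:Int)+1) = 2 from rfl,
              show PySem.List.pyGet? (a0 :: a1 :: a2 :: as'') 1 = some a1 by
                rw [show (1:Int) = ((1:Nat):Int) from rfl, PySem.List.pyGet?_natCast]; rfl,
              show PySem.List.pyGet? (b0 :: b1 :: b2 :: bs'') 1 = some b1 by
                rw [show (1:Int) = ((1:Nat):Int) from rfl, PySem.List.pyGet?_natCast]; rfl,
              show PySem.List.pyGet? (a0 :: a1 :: a2 :: as'') 2 = some a2 by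
                rw [show (2:Int) = ((2:Nat):Int) from rfl, PySem.List.pyGet?_natCast]; rfl,
              show PySem.List.pyGet? (b0 :: b1 :: b2 :: bs'') 2 = some b2 by
                rw [show (2:Int) = ((2:Nat):Int) from rfl, PySem.List.pyGet?_natCast]; rfl,
              hva, hvb, hwa, hwb]
            rw [pvStrCase, pvIntCase, pvIntCase]
          | [], _ => simp at ha3
          | _ :: _, [] => simp at hb3
        · -- decided at field 1
          simp only [a_precede_b, a_precede_b_alt, pvALoop, pvBLoop, pvDataform,
            PySem.List.enumerate_cons, PySem.List.enumerate_nil, PySem.List.pyGet?_zero_cons,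
            show ((0:Int)+1) = 1 from rfl,
            show PySem.List.pyGet? (a0 :: a1 :: as') 1 = some a1 by
              rw [show (1:Int) = ((1:Nat):Int) from rfl, PySem.List.pyGet?_natCast]; rfl,
            show PySem.List.pyGet? (b0 :: b1 :: bs') 1 = some b1 by
              rw [show (1:Int) = ((1:Nat):Int) from rfl, PySem.List.pyGet?_natCast]; rfl,
            hva, hvb]
          rw [pvStrCase, pvIntCase]
          rcases lt_or_gt_of_ne h1 with hlt | hgt
          · simp [h0, h1, hlt]
          · simp [h0, h1, not_lt.mpr hgt.le]
      | [], _ => simp at ha2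
      | _ :: _, [] => simp at hb2
    · -- decided at field 0
      simp only [a_precede_b, a_precede_b_alt, pvALoop, pvBLoop, pvDataform,
        PySem.List.enumerate_cons, PySem.List.enumerate_nil, PySem.List.pyGet?_zero_cons]
      rw [pvStrCase]
      simp [h0]
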